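-- pv_equiv track=rewrite | github.com/nacng/dicke_playground | exact_perm_inv/perm_inv_ED.py | num_to_part
-- ===== SOURCE A (Python) =====
-- def ctz(v: int):
--     # https://stackoverflow.com/a/63552117
--     """
--     Count trailing zeros in the binary representation
--     """
--     return (v & -v).bit_length() - 1
--
-- def num_to_part(n: int, nb: int, v: int):
--     # Inspiration from https://graphics.stanford.edu/~seander/bithacks.html#CountBitsSetKernighan
--     """
--     For a value v, number of qudits n, and number of bars nb, get a list of the number of objects (=qudits) in each of the nb+1 partitions
--     `Bars` are represented by `1` and objects are represented by `0`, i.e., v should have nb number of `1` in its binary representation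
--     """
--     # nb = d^2 - 1
--     res = [0] * (nb+1)
--     res[-1] = v
--     t = v
--     for i in range(2, nb+1):
--         res[-i] = (t & (t-1))
--         t = res[-i]
--     for i in range(1, nb):
--         res[-i] = res[-i] - res[-(i+1)]
--     res[0] = (n+nb-1) - ctz(res[1])
--     for i in range(1, nb):
--         res[i] = ctz(res[i]) - ctz(res[i+1]) - 1
--     res[nb] = ctz(res[nb])
--
--     return res
-- ===== SOURCE B (Python) =====
-- def ctz(v: int):
--     """
--     Count trailing zeros in the binary representation
--     """
--     return (v & -v).bit_length() - 1
--
-- def num_to_part(n: int, nb: int, v: int):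
--     """
--     For a value v, number of qudits n, and number of bars nb, get a list of the
--     number of objects in each of the nb+1 partitions, reading v's nb lowest set
--     bits as bar positions.
--     """
--     # positions of the nb lowest set bits of v, ascending (ctz(0) = -1 when bits run out)
--     p = []
--     for _ in range(nb):
--         p.append(ctz(v))
--         v &= v - 1
--     res = [(n + nb - 1) - p[nb - 1]]          # objects above the highest bar
--     for i in range(1, nb):
--         res.append(p[nb - i] - p[nb - i - 1] - 1)  # gap between consecutive bars, minus the bar
--     res.append(p[0])                           # objects below the lowest bar
--     return res
-- ===== Notes on version B (the rewrite author's own statement) =====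
-- stated objective: simpler
-- what changed: Instead of an in-place array filled by three index-juggling passes over progressively masked big integers (negative-index writes of t&(t-1) chains, then in-place differences, then in-place ctz of isolated bits), B extracts the positions of the nb lowest set bits once with ctz/clear-lowest-bit and builds the result list front-to-back from closed-form gap expressions over that positions list.
import Mathlib
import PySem

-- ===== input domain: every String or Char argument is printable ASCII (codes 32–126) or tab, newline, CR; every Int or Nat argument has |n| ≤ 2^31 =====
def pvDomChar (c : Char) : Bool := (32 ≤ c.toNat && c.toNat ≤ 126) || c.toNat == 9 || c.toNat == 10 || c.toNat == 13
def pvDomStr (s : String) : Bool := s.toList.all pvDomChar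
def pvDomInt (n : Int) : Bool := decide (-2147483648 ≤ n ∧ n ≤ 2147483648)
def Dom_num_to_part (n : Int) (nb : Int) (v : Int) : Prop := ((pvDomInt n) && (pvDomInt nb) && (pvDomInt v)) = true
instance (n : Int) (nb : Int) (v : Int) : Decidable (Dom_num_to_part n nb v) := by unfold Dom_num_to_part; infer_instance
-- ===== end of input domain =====

-- B replaces A's three in-place index-juggling passes over masked big integers by one
-- extraction of the nb lowest set-bit positions plus a front-to-back gap pass (objective: simpler).

-- ===== PORT A =====
def ctz (v : Int) : Int := (PySem.Int.bitLength (PySem.Int.band v (-v)) : Int) - 1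

def num_to_part (n : Int) (nb : Int) (v : Int) : List Int :=
  let res := List.replicate (nb + 1).toNat (0 : Int)
  let res := PySem.List.pySetD res (-1) v
  let st := (PySem.List.pyRange 2 (nb + 1)).foldl
    (fun (st : List Int × Int) i =>
      let x := PySem.Int.band st.2 (st.2 - 1)
      (PySem.List.pySetD st.1 (-i) x, x)) (res, v)
  let res := st.1
  let res := (PySem.List.pyRange 1 nb).foldl
    (fun res i =>
      PySem.List.pySetD res (-i) (PySem.List.pyGetD res (-i) 0 - PySem.List.pyGetD res (-(i + 1)) 0)) res
  let res := PySem.List.pySetD res 0 ((n + nb - 1) - ctz (PySem.List.pyGetD res 1 0))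
  let res := (PySem.List.pyRange 1 nb).foldl
    (fun res i =>
      PySem.List.pySetD res i (ctz (PySem.List.pyGetD res i 0) - ctz (PySem.List.pyGetD res (i + 1) 0) - 1)) res
  PySem.List.pySetD res nb (ctz (PySem.List.pyGetD res nb 0))

-- ===== PORT B =====
-- positions of the k lowest set bits, ascending (the loop `p.append(ctz(v)); v &= v-1`);
-- Source B's ctz helper is identical to A's, so the port shares `ctz`
def lowBitsPos : Nat → Int → List Int
  | 0, _ => []
  | k + 1, v => ctz v :: lowBitsPos k (PySem.Int.band v (v - 1))

def num_to_part_alt (n : Int) (nb : Int) (v : Int) : List Int :=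
  let p := lowBitsPos nb.toNat v
  let res := [(n + nb - 1) - PySem.List.pyGetD p (nb - 1) 0]
  let res := (PySem.List.pyRange 1 nb).foldl
    (fun res i => res ++ [PySem.List.pyGetD p (nb - i) 0 - PySem.List.pyGetD p (nb - i - 1) 0 - 1]) res
  res ++ [PySem.List.pyGetD p 0 0]

-- ===== PRECONDITION & SPEC =====
-- Pre_ excludes nb ≤ 0, on which Python A raises IndexError (res[1] on a list of length ≤ 1,
-- or res[-1] on an empty list); B raises there too.
def Pre_num_to_part (n : Int) (nb : Int) (v : Int) : Prop := 1 ≤ nb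
instance (n : Int) (nb : Int) (v : Int) : Decidable (Pre_num_to_part n nb v) := by unfold Pre_num_to_part; infer_instance
def pvWitness_num_to_part : Int × Int × Int := (6, 3, 21)

def Spec_num_to_part (n : Int) (nb : Int) (v : Int) (out : List Int) : Prop := out = num_to_part_alt n nb v
instance (n : Int) (nb : Int) (v : Int) (out : List Int) : Decidable (Spec_num_to_part n nb v out) := by unfold Spec_num_to_part; infer_instance

-- ===== CLAIM (what is proved, stated in full; the proofs are below) =====
def Claim_equal_num_to_part : Prop := ∀ (n : Int) (nb : Int) (v : Int), Dom_num_to_part n nb v → Pre_num_to_part n nb v → Spec_num_to_part n nb v (num_to_part n nb v)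

-- ===== LEMMAS AND PROOFS =====

-- Nat bit identities ------------------------------------------------------

lemma nat_and_bit (a b : Bool) (m n : Nat) :
    (Nat.bit a m) &&& (Nat.bit b n) = Nat.bit (a && b) (m &&& n) := by
  have h := Nat.bitwise_bit (f := and) (a := a) (m := m) (b := b) (n := n) (by simp)
  simpa [HAnd.hAnd, AndOp.and, Nat.land] using h

lemma nat_or_bit (a b : Bool) (m n : Nat) :
    (Nat.bit a m) ||| (Nat.bit b n) = Nat.bit (a || b) (m ||| n) := by
  have h := Nat.bitwise_bit (f := or) (a := a) (m := m) (b := b) (n := n) (by simp)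
  simpa [HOr.hOr, OrOp.or, Nat.lor] using h

lemma and01 (a b : Nat) : (2 * a) &&& (2 * b + 1) = 2 * (a &&& b) := by
  simpa [Nat.bit_val] using nat_and_bit false true a b
lemma and10 (a b : Nat) : (2 * a + 1) &&& (2 * b) = 2 * (a &&& b) := by
  simpa [Nat.bit_val] using nat_and_bit true false a b
lemma or01 (a b : Nat) : (2 * a) ||| (2 * b + 1) = 2 * (a ||| b) + 1 := by
  simpa [Nat.bit_val] using nat_or_bit false true a b
lemma or10 (a b : Nat) : (2 * a + 1) ||| (2 * b) = 2 * (a ||| b) + 1 := by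
  simpa [Nat.bit_val] using nat_or_bit true false a b

-- odd m : m &&& (m-1) = m - 1
lemma and_pred_odd (a : Nat) : (2 * a + 1) &&& (2 * a) = 2 * a := by
  simpa using and10 a a

-- u &&& (u+1) + (u ||| (u+1)) = 2u + 1
lemma and_or_succ (u : Nat) : (u &&& (u + 1)) + (u ||| (u + 1)) = 2 * u + 1 := by
  induction u using Nat.strong_induction_on with
  | _ u ih =>
    rcases Nat.even_or_odd u with he | ho
    · obtain ⟨a, ha⟩ := he
      have ha' : u = 2 * a := by omega
      subst ha'
      have h1 : (2 * a) &&& (2 * a + 1) = 2 * a := by simpa using and01 a a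
      have h2 : (2 * a) ||| (2 * a + 1) = 2 * a + 1 := by simpa using or01 a a
      omega
    · obtain ⟨a, ha⟩ := ho
      subst ha
      have hlt : a < 2 * a + 1 := by omega
      have h1 : (2 * a + 1) &&& (2 * a + 1 + 1) = 2 * (a &&& (a + 1)) := by
        have h := and10 a (a + 1)
        simpa [show 2 * a + 1 + 1 = 2 * (a + 1) by ring] using h
      have h2 : (2 * a + 1) ||| (2 * a + 1 + 1) = 2 * (a ||| (a + 1)) + 1 := by
        have h := or10 a (a + 1)
        simpa [show 2 * a + 1 + 1 = 2 * (a + 1) by ring] using h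
      have := ih a hlt
      omega

-- the isolated lowest bit has no bit in common with its predecessor
lemma iso_and_pred (m : Nat) : (m - (m &&& (m - 1))) &&& ((m - (m &&& (m - 1))) - 1) = 0 := by
  induction m using Nat.strong_induction_on with
  | _ m ih =>
    rcases Nat.eq_zero_or_pos m with hm | hm
    · subst hm; simp
    rcases Nat.even_or_odd m with he | ho
    · obtain ⟨a, ha⟩ := he
      have ha' : m = 2 * a := by omega
      subst ha'
      have ha0 : 0 < a := by omega
      have h1 : (2 * a) &&& (2 * a - 1) = 2 * (a &&& (a - 1)) := by
        have h := and01 a (a - 1)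
        rwa [show 2 * (a - 1) + 1 = 2 * a - 1 by omega] at h
      have hle : a &&& (a - 1) ≤ a := Nat.and_le_left
      have hda : 2 * a - ((2 * a) &&& (2 * a - 1)) = 2 * (a - (a &&& (a - 1))) := by
        rw [h1]; omega
      rw [hda]
      rcases Nat.eq_zero_or_pos (a - (a &&& (a - 1))) with h0 | h0
      · simp [h0]
      · have h2 : (2 * (a - (a &&& (a - 1)))) &&& (2 * (a - (a &&& (a - 1))) - 1)
            = 2 * ((a - (a &&& (a - 1))) &&& ((a - (a &&& (a - 1))) - 1)) := by
          have h := and01 (a - (a &&& (a - 1))) ((a - (a &&& (a - 1))) - 1)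
          rwa [show 2 * ((a - (a &&& (a - 1))) - 1) + 1 = 2 * (a - (a &&& (a - 1))) - 1 by omega] at h
        rw [h2, ih a (by omega)]
    · obtain ⟨a, ha⟩ := ho
      subst ha
      have e : 2 * a + 1 - 1 = 2 * a := by omega
      rw [e, and_pred_odd a]
      have e2 : 2 * a + 1 - 2 * a = 1 := by omega
      rw [e2]
      simp

-- Int-level case computations of band ---------------------------------------

lemma band_pos_neg (m : Nat) (hm : 0 < m) :
    PySem.Int.band (m : Int) (-(m : Int)) = ((m - (m &&& (m - 1)) : Nat) : Int) := by
  have h0 : (0 : Int) ≤ (m : Int) := by positivity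
  have h1 : ¬ ((0 : Int) ≤ -(m : Int)) := by omega
  simp only [PySem.Int.band, if_pos h0, if_neg h1]
  have e1 : ((m : Int)).toNat = m := by omega
  have e2 : (-(-(m : Int)) - 1).toNat = m - 1 := by omega
  rw [e1, e2]

lemma band_pos_pred (m : Nat) (hm : 0 < m) :
    PySem.Int.band (m : Int) ((m : Int) - 1) = ((m &&& (m - 1) : Nat) : Int) := by
  rw [PySem.Int.band_of_nonneg (by positivity) (by omega)]
  have e1 : ((m : Int)).toNat = m := by omega
  have e2 : ((m : Int) - 1).toNat = m - 1 := by omega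
  rw [e1, e2]

lemma band_neg_pred (u : Nat) :
    PySem.Int.band (-(u : Int) - 1) ((-(u : Int) - 1) - 1)
      = -((u ||| (u + 1) : Nat) : Int) - 1 := by
  have h1 : ¬ ((0 : Int) ≤ -(u : Int) - 1) := by omega
  have h2 : ¬ ((0 : Int) ≤ (-(u : Int) - 1) - 1) := by omega
  simp only [PySem.Int.band, if_neg h1, if_neg h2]
  have e1 : (-(-(u : Int) - 1) - 1).toNat = u := by omega
  have e2 : (-((-(u : Int) - 1) - 1) - 1).toNat = u + 1 := by omega
  rw [e1, e2]

lemma band_neg_negc (u : Nat) :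
    PySem.Int.band (-(u : Int) - 1) (-(-(u : Int) - 1))
      = (((u + 1) - ((u + 1) &&& u) : Nat) : Int) := by
  have h1 : ¬ ((0 : Int) ≤ -(u : Int) - 1) := by omega
  have h2 : (0 : Int) ≤ -(-(u : Int) - 1) := by omega
  simp only [PySem.Int.band, if_neg h1, if_pos h2]
  have e1 : (-(-(u : Int) - 1)).toNat = u + 1 := by omega
  have e2 : (-(-(u : Int) - 1) - 1).toNat = u := by omega
  rw [e1, e2]

-- c - (c & (c-1)) = c & -c
lemma sub_band_pred (c : Int) : c - PySem.Int.band c (c - 1) = PySem.Int.band c (-c) := by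
  rcases lt_trichotomy c 0 with hc | hc | hc
  · obtain ⟨u, rfl⟩ : ∃ u : Nat, c = -(u : Int) - 1 := ⟨(-c - 1).toNat, by omega⟩
    rw [band_neg_pred u, band_neg_negc u]
    have hand : (u + 1) &&& u ≤ u + 1 := Nat.and_le_left
    have hsum := and_or_succ u
    have hcomm : u &&& (u + 1) = (u + 1) &&& u := Nat.and_comm u (u + 1)
    omega
  · subst hc; simp
  · obtain ⟨m, rfl⟩ : ∃ m : Nat, c = (m : Int) := ⟨c.toNat, by omega⟩
    have hm : 0 < m := by exact_mod_cast hc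
    rw [band_pos_pred m hm, band_pos_neg m hm]
    have hle : m &&& (m - 1) ≤ m := Nat.and_le_left
    omega

-- band of the isolated bit with its own negation is itself
lemma band_iso_self (c : Int) :
    PySem.Int.band (PySem.Int.band c (-c)) (-(PySem.Int.band c (-c))) = PySem.Int.band c (-c) := by
  have key : ∀ dm : Nat, dm &&& (dm - 1) = 0 →
      PySem.Int.band (dm : Int) (-(dm : Int)) = (dm : Int) := by
    intro dm hdm
    rcases Nat.eq_zero_or_pos dm with h0 | h0
    · subst h0; simp
    · rw [band_pos_neg dm h0, hdm]
      simp
  rcases lt_trichotomy c 0 with hc | hc | hc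
  · obtain ⟨u, rfl⟩ : ∃ u : Nat, c = -(u : Int) - 1 := ⟨(-c - 1).toNat, by omega⟩
    rw [band_neg_negc u]
    refine key _ ?_
    have h := iso_and_pred (u + 1)
    simpa using h
  · subst hc; simp
  · obtain ⟨m, rfl⟩ : ∃ m : Nat, c = (m : Int) := ⟨c.toNat, by omega⟩
    have hm : 0 < m := by exact_mod_cast hc
    rw [band_pos_neg m hm]
    refine key _ ?_
    have h := iso_and_pred m
    simpa using h

-- ctz of A's stored difference equals ctz of the chain value
lemma ctz_sub_band_pred (c : Int) : ctz (c - PySem.Int.band c (c - 1)) = ctz c := by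
  rw [sub_band_pred]
  unfold ctz
  rw [band_iso_self]

-- the clear-lowest-bit chain ----------------------------------------------

def chain (v : Int) : Nat → Int
  | 0 => v
  | k + 1 => PySem.Int.band (chain v k) (chain v k - 1)

def pbit (v : Int) (k : Nat) : Int := ctz (chain v k)

lemma chain_shift (v : Int) (k : Nat) :
    chain (PySem.Int.band v (v - 1)) k = chain v (k + 1) := by
  induction k with
  | zero => rfl
  | succ k ih => simp [chain, ih]

lemma ctz_diff (v : Int) (k : Nat) :
    ctz (chain v k - chain v (k + 1)) = pbit v k := by
  simpa [chain, pbit] using ctz_sub_band_pred (chain v k)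

-- the common closed form of both programs
def target (n nb v : Int) : List Int :=
  ((n + nb - 1) - pbit v (nb.toNat - 1)) ::
    ((List.range (nb.toNat - 1)).map
      (fun j => pbit v (nb.toNat - 1 - j) - pbit v (nb.toNat - 2 - j) - 1)
    ++ [pbit v 0])

-- B equals the closed form --------------------------------------------------

lemma lowBitsPos_eq (k : Nat) (v : Int) :
    lowBitsPos k v = (List.range k).map (fun j => pbit v j) := by
  induction k generalizing v with
  | zero => rfl
  | succ k ih =>
    rw [List.range_succ_eq_map]
    simp only [lowBitsPos, List.map_cons, List.map_map, ih]
    refine congrArg₂ _ rfl ?_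
    refine List.map_congr_left ?_
    intro j _
    show pbit (PySem.Int.band v (v - 1)) j = pbit v (j + 1)
    unfold pbit
    rw [chain_shift]

-- small indexing/updating helpers ------------------------------------------

lemma pySetD_neg_natCast {α : Type} (xs : List α) (k : Nat) (x : α)
    (h1 : 0 < k) (h2 : k ≤ xs.length) :
    PySem.List.pySetD xs (-(k : Int)) x = xs.set (xs.length - k) x := by
  have hneg : ¬ ((0 : Int) ≤ -(k : Int)) := by omega
  have hge : -(xs.length : Int) ≤ -(k : Int) := by omega
  unfold PySem.List.pySetD PySem.List.pySet? PySem.List.pyIdx?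
  rw [if_neg hneg, if_pos hge]
  simp

lemma replicate_set (s : Nat) (x : Int) :
    (List.replicate (s + 1) (0 : Int)).set s x = List.replicate s 0 ++ [x] := by
  induction s with
  | zero => rfl
  | succ s ih =>
    rw [List.replicate_succ, List.set_cons_succ, ih, List.replicate_succ]
    simp

lemma getd_map_range (g : Nat → Int) (N j : Nat) (hj : j < N) :
    ((List.range N).map g).getD j 0 = g j := by
  rw [List.getD_eq_getElem?_getD]
  simp [List.getElem?_map, List.getElem?_range hj]

lemma pyGetD_neg_getD (xs : List Int) (k : Nat) (h1 : 0 < k) (h2 : k ≤ xs.length) :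
    PySem.List.pyGetD xs (-(k : Int)) 0 = xs.getD (xs.length - k) 0 := by
  rw [PySem.List.pyGetD_neg_natCast xs k 0 h1 h2]
  exact (List.getD_eq_getElem xs 0 (by omega)).symm

lemma getD_cons_of_pos (x : Int) (l : List Int) (m : Nat) (hm : 0 < m) :
    (x :: l).getD m 0 = l.getD (m - 1) 0 := by
  obtain ⟨m', rfl⟩ : ∃ m', m = m' + 1 := ⟨m - 1, by omega⟩
  simp [List.getD_cons_succ]

lemma set_cons_of_pos (x : Int) (l : List Int) (m : Nat) (hm : 0 < m) (w : Int) :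
    (x :: l).set m w = x :: l.set (m - 1) w := by
  obtain ⟨m', rfl⟩ : ∃ m', m = m' + 1 := ⟨m - 1, by omega⟩
  simp [List.set_cons_succ]

lemma pyGetD_one (x y : Int) (l : List Int) :
    PySem.List.pyGetD (x :: y :: l) 1 0 = y := by
  rw [show (1 : Int) = ((1 : Nat) : Int) by norm_num, PySem.List.pyGetD_natCast]
  simp

lemma pySetD_zero (xs : List Int) (w : Int) :
    PySem.List.pySetD xs 0 w = xs.set 0 w := by
  rw [PySem.List.pySetD_of_nonneg xs w (by norm_num)]
  rfl

-- A's first pass: progressively clear lowest set bits, filling from the back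
lemma phase1 (v : Int) (N : Nat) (hN : 1 ≤ N) :
    ∀ k : Nat, k ≤ N - 1 →
      (PySem.List.pyRange 2 (2 + (k : Int))).foldl
        (fun (st : List Int × Int) i =>
          (PySem.List.pySetD st.1 (-i) (PySem.Int.band st.2 (st.2 - 1)),
           PySem.Int.band st.2 (st.2 - 1)))
        (List.replicate N 0 ++ [v], v)
      = (List.replicate (N - k) 0 ++ (List.range (k + 1)).map (fun j => chain v (k - j)),
         chain v k) := by
  intro k
  induction k with
  | zero =>
    intro _
    rw [show (2 + ((0 : Nat) : Int)) = 2 by norm_num, PySem.List.pyRange_one_eq_nil le_rfl]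
    simp [chain]
  | succ k ih =>
    intro hk
    have hk' : k ≤ N - 1 := by omega
    rw [show (2 + ((k + 1 : Nat) : Int)) = (2 + (k : Int)) + 1 by push_cast; ring,
        PySem.List.pyRange_one_succ_right (by omega : (2 : Int) ≤ 2 + (k : Int)),
        List.foldl_append, ih hk']
    simp only [List.foldl_cons, List.foldl_nil]
    have hX : PySem.Int.band (chain v k) (chain v k - 1) = chain v (k + 1) := rfl
    rw [hX]
    have hlen : (List.replicate (N - k) (0 : Int)
        ++ (List.range (k + 1)).map (fun j => chain v (k - j))).length = N + 1 := by
      simp; omega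
    rw [show -(2 + (k : Int)) = -(((k + 2 : Nat)) : Int) by push_cast; ring]
    rw [pySetD_neg_natCast _ _ _ (by omega) (by rw [hlen]; omega), hlen]
    rw [show N + 1 - (k + 2) = N - (k + 1) by omega]
    rw [List.set_append,
        if_pos (show N - (k + 1) < (List.replicate (N - k) (0 : Int)).length by simp; omega)]
    have hrep : List.replicate (N - k) (0 : Int) = List.replicate ((N - (k + 1)) + 1) 0 := by
      congr 1; omega
    rw [hrep, replicate_set, List.append_assoc]
    have hlist : (List.range ((k + 1) + 1)).map (fun j => chain v (k + 1 - j))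
        = [chain v (k + 1)] ++ (List.range (k + 1)).map (fun j => chain v (k - j)) := by
      rw [List.range_succ_eq_map, List.map_cons, List.map_map, List.singleton_append]
      refine congrArg₂ List.cons ?_ ?_
      · rw [show k + 1 - 0 = k + 1 by omega]
      · refine List.map_congr_left ?_
        intro j _
        show chain v (k + 1 - (j + 1)) = chain v (k - j)
        rw [show k + 1 - (j + 1) = k - j by omega]
    rw [← hlist]

-- A's second pass: in-place differences of consecutive chain values
lemma phase2 (v : Int) (N : Nat) (hN : 1 ≤ N) :
    ∀ k : Nat, k ≤ N - 1 →
      (PySem.List.pyRange 1 (1 + (k : Int))).foldl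
        (fun res i => PySem.List.pySetD res (-i)
          (PySem.List.pyGetD res (-i) 0 - PySem.List.pyGetD res (-(i + 1)) 0))
        ((0 : Int) :: (List.range N).map (fun j => chain v (N - 1 - j)))
      = 0 :: ((List.range (N - k)).map (fun j => chain v (N - 1 - j))
          ++ (List.range k).map (fun j => chain v (k - 1 - j) - chain v (k - j))) := by
  intro k
  induction k with
  | zero =>
    intro _
    rw [show (1 + ((0 : Nat) : Int)) = 1 by norm_num, PySem.List.pyRange_one_eq_nil le_rfl]
    simp
  | succ k ih =>
    intro hk
    have hk' : k ≤ N - 1 := by omega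
    rw [show (1 + ((k + 1 : Nat) : Int)) = (1 + (k : Int)) + 1 by push_cast; ring,
        PySem.List.pyRange_one_succ_right (by omega : (1 : Int) ≤ 1 + (k : Int)),
        List.foldl_append, ih hk']
    simp only [List.foldl_cons, List.foldl_nil]
    set L := (0 : Int) :: ((List.range (N - k)).map (fun j => chain v (N - 1 - j))
        ++ (List.range k).map (fun j => chain v (k - 1 - j) - chain v (k - j))) with hL
    have hlen : L.length = N + 1 := by rw [hL]; simp; omega
    have hgd : ∀ m : Nat, m < N - k →
        L.getD (m + 1) 0 = chain v (N - 1 - m) := by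
      intro m hm
      rw [hL, List.getD_cons_succ, List.getD_append _ _ _ m (by simp; omega),
          getd_map_range _ _ _ (by omega)]
    have hr1 : PySem.List.pyGetD L (-(1 + (k : Int))) 0 = chain v k := by
      rw [show -(1 + (k : Int)) = -(((k + 1 : Nat)) : Int) by push_cast; ring,
          pyGetD_neg_getD L (k + 1) (by omega) (by omega), hlen,
          show N + 1 - (k + 1) = (N - k - 1) + 1 by omega,
          hgd (N - k - 1) (by omega), show N - 1 - (N - k - 1) = k by omega]
    have hr2 : PySem.List.pyGetD L (-((1 + (k : Int)) + 1)) 0 = chain v (k + 1) := by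
      rw [show -((1 + (k : Int)) + 1) = -(((k + 2 : Nat)) : Int) by push_cast; ring,
          pyGetD_neg_getD L (k + 2) (by omega) (by omega), hlen,
          show N + 1 - (k + 2) = (N - k - 2) + 1 by omega,
          hgd (N - k - 2) (by omega), show N - 1 - (N - k - 2) = k + 1 by omega]
    rw [hr1, hr2]
    rw [show -(1 + (k : Int)) = -(((k + 1 : Nat)) : Int) by push_cast; ring,
        pySetD_neg_natCast L (k + 1) _ (by omega) (by omega), hlen,
        show N + 1 - (k + 1) = N - k by omega, hL]
    rw [show N - k = (N - k - 1) + 1 by omega, List.set_cons_succ, List.range_succ,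
        List.map_append, List.map_singleton, List.append_assoc]
    rw [List.set_append,
        if_neg (show ¬ (N - k - 1 < ((List.range (N - k - 1)).map
          (fun j => chain v (N - 1 - j))).length) by simp)]
    rw [show N - k - 1 - ((List.range (N - k - 1)).map
          (fun j => chain v (N - 1 - j))).length = 0 by simp, List.singleton_append,
        List.set_cons_zero]
    refine congrArg (fun l => (0 : Int) :: l) ?_
    have e1 : (List.range (N - (k + 1))).map (fun j => chain v (N - 1 - j))
        = (List.range (N - k - 1)).map (fun j => chain v (N - 1 - j)) := by
      rw [show N - (k + 1) = N - k - 1 by omega]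
    rw [e1]
    refine congrArg (fun l => (List.range (N - k - 1)).map
      (fun j => chain v (N - 1 - j)) ++ l) ?_
    rw [List.range_succ_eq_map, List.map_cons, List.map_map]
    refine congrArg₂ List.cons ?_ ?_
    · show chain v k - chain v (k + 1)
        = chain v (k + 1 - 1 - 0) - chain v (k + 1 - 0)
      rw [show k + 1 - 1 - 0 = k by omega, show k + 1 - 0 = k + 1 by omega]
    · refine List.map_congr_left ?_
      intro j _
      show chain v (k - 1 - j) - chain v (k - j)
          = chain v (k + 1 - 1 - (j + 1)) - chain v (k + 1 - (j + 1))
      rw [show k + 1 - 1 - (j + 1) = k - 1 - j by omega,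
          show k + 1 - (j + 1) = k - j by omega]

-- A's final pass: replace each slot by its ctz-gap, front to back
lemma phase4 (N : Nat) (hN : 1 ≤ N) (a : Int) (T : List Int) (hT : T.length = N) :
    ∀ k : Nat, k ≤ N - 1 →
      (PySem.List.pyRange 1 (1 + (k : Int))).foldl
        (fun res i => PySem.List.pySetD res i
          (ctz (PySem.List.pyGetD res i 0) - ctz (PySem.List.pyGetD res (i + 1) 0) - 1))
        (a :: T)
      = a :: ((List.range k).map (fun j => ctz (T.getD j 0) - ctz (T.getD (j + 1) 0) - 1)
          ++ T.drop k) := by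
  intro k
  induction k with
  | zero =>
    intro _
    rw [show (1 + ((0 : Nat) : Int)) = 1 by norm_num, PySem.List.pyRange_one_eq_nil le_rfl]
    simp
  | succ k ih =>
    intro hk
    have hk' : k ≤ N - 1 := by omega
    rw [show (1 + ((k + 1 : Nat) : Int)) = (1 + (k : Int)) + 1 by push_cast; ring,
        PySem.List.pyRange_one_succ_right (by omega : (1 : Int) ≤ 1 + (k : Int)),
        List.foldl_append, ih hk']
    simp only [List.foldl_cons, List.foldl_nil]
    set P := (List.range k).map (fun j => ctz (T.getD j 0) - ctz (T.getD (j + 1) 0) - 1)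
      with hP
    have hPlen : P.length = k := by rw [hP]; simp
    have hdropT : ∀ m : Nat, k + m < N → (T.drop k).getD m 0 = T.getD (k + m) 0 := by
      intro m hm
      rw [List.getD_eq_getElem _ _ (by simp [hT]; omega), List.getElem_drop,
          List.getD_eq_getElem _ _ (by omega)]
    have hr1 : PySem.List.pyGetD (a :: (P ++ T.drop k)) (1 + (k : Int)) 0 = T.getD k 0 := by
      rw [show (1 + (k : Int)) = (((k + 1 : Nat)) : Int) by push_cast; ring,
          PySem.List.pyGetD_natCast, List.getD_cons_succ,
          List.getD_append_right _ _ _ _ (by omega), hPlen, Nat.sub_self,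
          hdropT 0 (by omega), Nat.add_zero]
    have hr2 : PySem.List.pyGetD (a :: (P ++ T.drop k)) ((1 + (k : Int)) + 1) 0
        = T.getD (k + 1) 0 := by
      rw [show ((1 + (k : Int)) + 1) = (((k + 2 : Nat)) : Int) by push_cast; ring,
          PySem.List.pyGetD_natCast, List.getD_cons_succ,
          List.getD_append_right _ _ _ _ (by omega), hPlen,
          show k + 1 - k = 1 by omega, hdropT 1 (by omega)]
    rw [hr1, hr2]
    rw [show (1 + (k : Int)) = (((k + 1 : Nat)) : Int) by push_cast; ring,
        PySem.List.pySetD_natCast, List.set_cons_succ]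
    rw [List.set_append, if_neg (show ¬ (k < P.length) by omega)]
    rw [hPlen, Nat.sub_self]
    rw [List.drop_eq_getElem_cons (show k < T.length by omega), List.set_cons_zero]
    refine congrArg (fun l => a :: l) ?_
    rw [List.range_succ, List.map_append, List.map_singleton, List.append_assoc,
        List.singleton_append]

-- instances of the phase lemmas at the loop bounds the port uses ------------

lemma phase1' (v : Int) (N : Nat) (hN : 1 ≤ N) :
    (PySem.List.pyRange 2 ((N : Int) + 1)).foldl
      (fun (st : List Int × Int) i =>
        (PySem.List.pySetD st.1 (-i) (PySem.Int.band st.2 (st.2 - 1)),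
         PySem.Int.band st.2 (st.2 - 1)))
      (List.replicate N 0 ++ [v], v)
    = (List.replicate (N - (N - 1)) 0
        ++ (List.range ((N - 1) + 1)).map (fun j => chain v (N - 1 - j)),
       chain v (N - 1)) := by
  rw [show ((N : Int) + 1) = 2 + ((N - 1 : Nat) : Int) by omega]
  exact phase1 v N hN (N - 1) le_rfl

lemma phase2' (v : Int) (N : Nat) (hN : 1 ≤ N) :
    (PySem.List.pyRange 1 ((N : Int))).foldl
      (fun res i => PySem.List.pySetD res (-i)
        (PySem.List.pyGetD res (-i) 0 - PySem.List.pyGetD res (-(i + 1)) 0))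
      ((0 : Int) :: (List.range N).map (fun j => chain v (N - 1 - j)))
    = 0 :: ((List.range (N - (N - 1))).map (fun j => chain v (N - 1 - j))
        ++ (List.range (N - 1)).map
          (fun j => chain v (N - 1 - 1 - j) - chain v (N - 1 - j))) := by
  rw [show ((N : Int)) = 1 + ((N - 1 : Nat) : Int) by omega]
  exact phase2 v N hN (N - 1) le_rfl

lemma phase4' (N : Nat) (hN : 1 ≤ N) (a : Int) (T : List Int) (hT : T.length = N) :
    (PySem.List.pyRange 1 ((N : Int))).foldl
      (fun res i => PySem.List.pySetD res i
        (ctz (PySem.List.pyGetD res i 0) - ctz (PySem.List.pyGetD res (i + 1) 0) - 1))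
      (a :: T)
    = a :: ((List.range (N - 1)).map
        (fun j => ctz (T.getD j 0) - ctz (T.getD (j + 1) 0) - 1)
        ++ T.drop (N - 1)) := by
  rw [show ((N : Int)) = 1 + ((N - 1 : Nat) : Int) by omega]
  exact phase4 N hN a T hT (N - 1) le_rfl

-- B equals the closed form --------------------------------------------------

lemma alt_eq_target (n nb v : Int) (hnb : 1 ≤ nb) :
    num_to_part_alt n nb v = target n nb v := by
  obtain ⟨N, hN, rfl⟩ : ∃ N : Nat, 1 ≤ N ∧ nb = (N : Int) := ⟨nb.toNat, by omega, by omega⟩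
  simp only [num_to_part_alt]
  rw [show ((N : Int)).toNat = N by omega, lowBitsPos_eq,
      PySem.List.foldl_append_singleton_eq_map]
  rw [show ((N : Int) - 1) = ((N - 1 : Nat) : Int) by omega,
      PySem.List.pyGetD_natCast, getd_map_range _ _ _ (by omega)]
  rw [PySem.List.pyRange_one 1 (N : Int),
      show ((N : Int) - 1).toNat = N - 1 by omega, List.map_map]
  rw [PySem.List.pyGetD_zero, getd_map_range _ _ _ (by omega)]
  unfold target
  rw [show ((N : Int)).toNat = N by omega]
  rw [List.singleton_append, List.cons_append]
  refine congrArg (fun l =>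
    ((n + (N : Int) - 1) - pbit v (N - 1)) :: (l ++ [pbit v 0])) ?_
  refine List.map_congr_left ?_
  intro j hj
  have hjN : j < N - 1 := List.mem_range.mp hj
  show PySem.List.pyGetD ((List.range N).map (fun j => pbit v j)) ((N : Int) - (1 + (j : Int))) 0
      - PySem.List.pyGetD ((List.range N).map (fun j => pbit v j))
          ((N : Int) - (1 + (j : Int)) - 1) 0 - 1
    = pbit v (N - 1 - j) - pbit v (N - 2 - j) - 1
  rw [show ((N : Int) - (1 + (j : Int))) = ((N - 1 - j : Nat) : Int) by omega,
      show (((N - 1 - j : Nat) : Int) - 1) = ((N - 2 - j : Nat) : Int) by omega,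
      PySem.List.pyGetD_natCast, PySem.List.pyGetD_natCast,
      getd_map_range _ _ _ (by omega), getd_map_range _ _ _ (by omega)]

-- A equals the closed form --------------------------------------------------

lemma a_eq_target (n nb v : Int) (hnb : 1 ≤ nb) :
    num_to_part n nb v = target n nb v := by
  obtain ⟨N, hN, rfl⟩ : ∃ N : Nat, 1 ≤ N ∧ nb = (N : Int) := ⟨nb.toNat, by omega, by omega⟩
  simp only [num_to_part]
  rw [show ((N : Int) + 1).toNat = N + 1 by omega]
  rw [show ((-1 : Int)) = -(((1 : Nat)) : Int) by norm_num,
      pySetD_neg_natCast _ _ _ (by omega) (by simp), List.length_replicate,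
      show N + 1 - 1 = N by omega, replicate_set]
  rw [phase1' v N hN]
  dsimp only
  rw [show N - (N - 1) = 1 by omega, show (N - 1) + 1 = N by omega, List.replicate_one,
      List.singleton_append]
  rw [phase2' v N hN]
  rw [show N - (N - 1) = 1 by omega]
  simp only [List.range_one, List.map_cons, List.map_nil, Nat.sub_zero, List.singleton_append]
  rw [pyGetD_one, pySetD_zero, List.set_cons_zero]
  have hT : ((chain v (N - 1)) :: (List.range (N - 1)).map
      (fun j => chain v (N - 1 - 1 - j) - chain v (N - 1 - j))).length = N := by
    simp; omega
  rw [phase4' N hN _ _ hT]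
  -- the ctz values of the stored list, uniformly
  have hctzT : ∀ i : Nat, i < N →
      ctz (((chain v (N - 1)) :: (List.range (N - 1)).map
        (fun j => chain v (N - 1 - 1 - j) - chain v (N - 1 - j))).getD i 0)
      = pbit v (N - 1 - i) := by
    intro i hi
    match i with
    | 0 =>
      rw [List.getD_cons_zero]
      show pbit v (N - 1) = pbit v (N - 1 - 0)
      rw [show N - 1 - 0 = N - 1 by omega]
    | j + 1 =>
      rw [List.getD_cons_succ, getd_map_range _ _ _ (by omega)]
      have e1 : N - 1 - 1 - j = N - 2 - j := by omega
      have e2 : N - 1 - j = (N - 2 - j) + 1 := by omega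
      rw [e1, e2, ctz_diff]
      show pbit v (N - 2 - j) = pbit v (N - 1 - (j + 1))
      rw [show N - 1 - (j + 1) = N - 2 - j by omega]
  -- last read and write
  set T := (chain v (N - 1)) :: (List.range (N - 1)).map
      (fun j => chain v (N - 1 - 1 - j) - chain v (N - 1 - j)) with hTdef
  set P := (List.range (N - 1)).map
      (fun j => ctz (T.getD j 0) - ctz (T.getD (j + 1) 0) - 1) with hPdef
  have hPlen : P.length = N - 1 := by rw [hPdef]; simp
  have hTlen : T.length = N := hT
  have hread : PySem.List.pyGetD
      (((n + (N : Int) - 1) - ctz (chain v (N - 1))) :: (P ++ T.drop (N - 1))) ((N : Int)) 0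
      = T.getD (N - 1) 0 := by
    rw [PySem.List.pyGetD_natCast, getD_cons_of_pos _ _ _ (by omega),
        List.getD_append_right _ _ _ _ (by omega), hPlen,
        show N - 1 - (N - 1) = 0 by omega,
        List.drop_eq_getElem_cons (show N - 1 < T.length by omega), List.getD_cons_zero,
        List.getD_eq_getElem _ _ (by omega)]
  rw [hread]
  rw [PySem.List.pySetD_natCast, set_cons_of_pos _ _ _ (by omega)]
  rw [List.set_append, if_neg (show ¬ (N - 1 < P.length) by omega)]
  rw [hPlen, show N - 1 - (N - 1) = 0 by omega]
  rw [List.drop_eq_getElem_cons (show N - 1 < T.length by omega), List.set_cons_zero,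
      show N - 1 + 1 = N by omega]
  have hdropN : T.drop N = [] := by rw [← hTlen]; exact List.drop_length
  rw [hdropN]
  unfold target
  rw [show ((N : Int)).toNat = N by omega]
  refine congrArg₂ _ rfl ?_
  refine congrArg₂ _ ?_ ?_
  · rw [hPdef]
    refine List.map_congr_left ?_
    intro j hj
    have hjN : j < N - 1 := List.mem_range.mp hj
    rw [hctzT j (by omega), hctzT (j + 1) (by omega)]
    show pbit v (N - 1 - j) - pbit v (N - 1 - (j + 1)) - 1
      = pbit v (N - 1 - j) - pbit v (N - 2 - j) - 1
    rw [show N - 1 - (j + 1) = N - 2 - j by omega]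
  · rw [hctzT (N - 1) (by omega), show N - 1 - (N - 1) = 0 by omega]

-- ===== VERDICT (by name: the statement is the Claim_ definition above) =====
theorem num_to_part_spec : Claim_equal_num_to_part := by
  intro n nb v _hdom hpre
  unfold Spec_num_to_part
  rw [a_eq_target n nb v hpre, alt_eq_target n nb v hpre]
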